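-- pv_equiv track=rewrite | github.com/poezio/slixmpp | slixmpp/jid.py | _unescape_node
-- ===== SOURCE A (Python) =====
-- JID_ESCAPE_SEQUENCES = {'\\20', '\\22', '\\26', '\\27', '\\2f',
--                         '\\3a', '\\3c', '\\3e', '\\40', '\\5c'}
--
-- JID_UNESCAPE_TRANSFORMATIONS = {'\\20': ' ',
--                                 '\\22': '"',
--                                 '\\26': '&',
--                                 '\\27': "'",
--                                 '\\2f': '/',
--                                 '\\3a': ':',
--                                 '\\3c': '<',
--                                 '\\3e': '>',
--                                 '\\40': '@',
--                                 '\\5c': '\\'}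
--
-- def _unescape_node(node):
--     """Unescape a local portion of a JID.
--
--     .. note::
--         The unescaped local portion is meant ONLY for presentation,
--         and should not be used for other purposes.
--     """
--     unescaped = []
--     seq = ''
--     for i, char in enumerate(node):
--         if char == '\\':
--             seq = node[i:i+3]
--             if seq not in JID_ESCAPE_SEQUENCES:
--                 seq = ''
--         if seq:
--             if len(seq) == 3:
--                 unescaped.append(JID_UNESCAPE_TRANSFORMATIONS.get(seq, char))
--
--             # Pop character off the escape sequence, and ignore it
--             seq = seq[1:]
--         else:
--             unescaped.append(char)
--     return ''.join(unescaped)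
-- ===== SOURCE B (Python) =====
-- JID_UNESCAPE_TRANSFORMATIONS = {'\\20': ' ',
--                                 '\\22': '"',
--                                 '\\26': '&',
--                                 '\\27': "'",
--                                 '\\2f': '/',
--                                 '\\3a': ':',
--                                 '\\3c': '<',
--                                 '\\3e': '>',
--                                 '\\40': '@',
--                                 '\\5c': '\\'}
--
-- def _unescape_node(node):
--     """Unescape a local portion of a JID (index-driven scan)."""
--     out = []
--     i = 0
--     n = len(node)
--     while i < n:
--         rep = JID_UNESCAPE_TRANSFORMATIONS.get(node[i:i+3])
--         if rep is not None:
--             out.append(rep)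
--             i += 3
--         else:
--             out.append(node[i])
--             i += 1
--     return ''.join(out)
-- ===== Notes on version B (the rewrite author's own statement) =====
-- stated objective: simpler
-- what changed: A runs a per-character state machine whose pending-escape variable is set on a backslash and popped one character per loop iteration, with its length deciding when to emit; B is a direct index-driven scan that looks the 3-char window up in the unescape dict and skips 3 positions on a hit, else emits one character and advances by 1.
import Mathlib
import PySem

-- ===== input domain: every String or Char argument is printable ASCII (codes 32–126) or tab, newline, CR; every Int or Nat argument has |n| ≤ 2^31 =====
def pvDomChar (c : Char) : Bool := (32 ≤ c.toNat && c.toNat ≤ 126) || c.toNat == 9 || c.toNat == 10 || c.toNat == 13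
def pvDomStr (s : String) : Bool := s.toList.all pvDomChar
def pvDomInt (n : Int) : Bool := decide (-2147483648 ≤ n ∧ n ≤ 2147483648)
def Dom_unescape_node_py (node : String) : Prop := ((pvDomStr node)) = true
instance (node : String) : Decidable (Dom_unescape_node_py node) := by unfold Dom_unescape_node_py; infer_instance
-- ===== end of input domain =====

-- B replaces A's `seq` state variable (set on '\', popped one char per iteration) by a direct
-- index-driven scan: look the 3-char window up in the dict, emit its value and skip 3 on a hit,
-- else emit one char and advance by 1 (objective: simpler; same O(n) cost).

-- ===== PORT A =====
def pvJidEscapeSequences : PySem.Set (List Char) :=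
  PySem.Set.ofList [['\\','2','0'], ['\\','2','2'], ['\\','2','6'], ['\\','2','7'], ['\\','2','f'],
                    ['\\','3','a'], ['\\','3','c'], ['\\','3','e'], ['\\','4','0'], ['\\','5','c']]

def pvJidUnescapeTransformations : PySem.Dict (List Char) (List Char) :=
  PySem.Dict.ofList [(['\\','2','0'], [' ']), (['\\','2','2'], ['"']), (['\\','2','6'], ['&']),
    (['\\','2','7'], ['\'']), (['\\','2','f'], ['/']), (['\\','3','a'], [':']),
    (['\\','3','c'], ['<']), (['\\','3','e'], ['>']), (['\\','4','0'], ['@']), (['\\','5','c'], ['\\'])]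

-- the body of A's for-loop, state = (unescaped, seq)
def pvStepA (cs : List Char) (st : List (List Char) × List Char) (p : Int × Char) :
    List (List Char) × List Char :=
  let unescaped := st.1
  let i := p.1
  let char := p.2
  let seq :=
    if char = '\\' then
      if ¬ (PySem.Set.contains pvJidEscapeSequences (PySem.List.slice cs (some i) (some (i + 3))))
        then ([] : List Char)
        else PySem.List.slice cs (some i) (some (i + 3))
    else st.2
  if seq ≠ [] then
    (if seq.length = 3 then unescaped ++ [pvJidUnescapeTransformations.getD seq [char]] else unescaped,
     seq.drop 1)
  else
    (unescaped ++ [[char]], seq)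

def unescape_node_py (node : String) : String :=
  let cs := node.toList
  let res := (PySem.List.enumerate cs 0).foldl (pvStepA cs) ([], [])
  String.ofList (PySem.Chars.join [] res.1)

-- ===== PORT B =====
def pvJidUnescapeB : PySem.Dict (List Char) (List Char) :=
  PySem.Dict.ofList [(['\\','2','0'], [' ']), (['\\','2','2'], ['"']), (['\\','2','6'], ['&']),
    (['\\','2','7'], ['\'']), (['\\','2','f'], ['/']), (['\\','3','a'], [':']),
    (['\\','3','c'], ['<']), (['\\','3','e'], ['>']), (['\\','4','0'], ['@']), (['\\','5','c'], ['\\'])]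

-- B's while-loop: the window node[i:i+3] is [c, a, b] when ≥ 3 chars remain
-- (a shorter trailing window is never a dict key, hence the catch-all second arm)
def pvUnescapeGo : List Char → List Char
  | c :: a :: b :: rest =>
      match pvJidUnescapeB.get? [c, a, b] with
      | some v => v ++ pvUnescapeGo rest
      | none   => c :: pvUnescapeGo (a :: b :: rest)
  | c :: rest => c :: pvUnescapeGo rest
  | [] => []

def unescape_node_py_alt (node : String) : String :=
  String.ofList (pvUnescapeGo node.toList)

-- ===== PRECONDITION & SPEC =====
def Spec_unescape_node_py (node : String) (out : String) : Prop := out = unescape_node_py_alt node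
instance (node : String) (out : String) : Decidable (Spec_unescape_node_py node out) := by unfold Spec_unescape_node_py; infer_instance

-- ===== CLAIM (what is proved, stated in full; the proofs are below) =====
def Claim_equal_unescape_node_py : Prop := ∀ (node : String), Dom_unescape_node_py node → Spec_unescape_node_py node (unescape_node_py node)

-- ===== LEMMAS AND PROOFS =====

theorem pvSeqs_eq : pvJidEscapeSequences =
    [['\\','2','0'], ['\\','2','2'], ['\\','2','6'], ['\\','2','7'], ['\\','2','f'],
     ['\\','3','a'], ['\\','3','c'], ['\\','3','e'], ['\\','4','0'], ['\\','5','c']] := by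
  decide

theorem pvDictB_eq : pvJidUnescapeB =
    ⟨[(['\\','2','0'], [' ']), (['\\','2','2'], ['"']), (['\\','2','6'], ['&']),
      (['\\','2','7'], ['\'']), (['\\','2','f'], ['/']), (['\\','3','a'], [':']),
      (['\\','3','c'], ['<']), (['\\','3','e'], ['>']), (['\\','4','0'], ['@']), (['\\','5','c'], ['\\'])]⟩ := by
  decide

-- one iteration of A's loop on a character whose 3-char window is not an escape sequence
theorem pvMiss (cs : List Char) (acc : List (List Char)) (i : Int) (c : Char) (w : List Char)
    (hsl : PySem.List.slice cs (some i) (some (i + 3)) = w)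
    (hni : w ∉ pvJidEscapeSequences) :
    pvStepA cs (acc, []) (i, c) = (acc ++ [[c]], []) := by
  simp [pvStepA, hsl, hni]

-- three iterations of A's loop across a recognised escape sequence '\ab'
theorem pvHit (cs : List Char) (acc : List (List Char)) (i : Int) (a b : Char) (v : List Char)
    (ha : a ≠ '\\') (hb : b ≠ '\\')
    (hmem : ['\\', a, b] ∈ pvJidEscapeSequences)
    (hsl : PySem.List.slice cs (some i) (some (i + 3)) = ['\\', a, b])
    (hget : pvJidUnescapeTransformations.getD ['\\', a, b] ['\\'] = v) :
    pvStepA cs (pvStepA cs (pvStepA cs (acc, []) (i, '\\')) (i + 1, a)) (i + 1 + 1, b)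
      = (acc ++ [v], []) := by
  simp [pvStepA, hsl, ha, hb, hmem, hget]

-- the loop invariant: running A's loop over the suffix starting at index |pre| (with empty
-- pending escape state) appends exactly B's output on that suffix, as singleton strings
theorem pvMain (cs : List Char) :
    ∀ (n : Nat) (suffix pre : List Char) (acc : List (List Char)), suffix.length ≤ n →
      cs = pre ++ suffix →
      ((PySem.List.enumerate suffix (pre.length : Int)).foldl (pvStepA cs) (acc, [])).1
        = acc ++ (pvUnescapeGo suffix).map (fun c => [c]) := by
  intro n
  induction n with
  | zero =>
    intro suffix pre acc hlen hcs
    cases suffix with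
    | nil => simp [PySem.List.enumerate_nil, pvUnescapeGo]
    | cons c t => simp at hlen
  | succ n ih =>
    intro suffix pre acc hlen hcs
    have hsl : PySem.List.slice cs (some (pre.length : Int)) (some ((pre.length : Int) + 3))
        = suffix.take 3 := by
      rw [show ((pre.length : Int) + 3) = ((pre.length : Int) + ((3 : Nat) : Int)) from by norm_num,
          PySem.List.slice_natCast_add, hcs, List.drop_left]
    rcases suffix with _ | ⟨c, _ | ⟨a, _ | ⟨b, rest⟩⟩⟩
    · simp [PySem.List.enumerate_nil, pvUnescapeGo]
    · -- one trailing char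
      have hsl' : PySem.List.slice cs (some (pre.length : Int)) (some ((pre.length : Int) + 3))
          = [c] := by rw [hsl]; simp
      have hni : [c] ∉ pvJidEscapeSequences := by rw [pvSeqs_eq]; simp
      simp only [PySem.List.enumerate_cons, PySem.List.enumerate_nil, List.foldl_cons,
        List.foldl_nil]
      rw [pvMiss cs acc (pre.length : Int) c [c] hsl' hni]
      simp [pvUnescapeGo]
    · -- two trailing chars
      have hsl' : PySem.List.slice cs (some (pre.length : Int)) (some ((pre.length : Int) + 3))
          = [c, a] := by rw [hsl]; simp
      have hni : [c, a] ∉ pvJidEscapeSequences := by rw [pvSeqs_eq]; simp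
      have hih := ih [a] (pre ++ [c]) (acc ++ [[c]]) (by simp at hlen ⊢; omega)
        (by rw [hcs]; simp)
      have e : (((pre ++ [c]).length : Nat) : Int) = (pre.length : Int) + 1 := by
        push_cast [List.length_append, List.length_cons, List.length_nil]; ring
      rw [e] at hih
      simp only [PySem.List.enumerate_cons, PySem.List.enumerate_nil, List.foldl_cons,
        List.foldl_nil] at hih ⊢
      rw [pvMiss cs acc (pre.length : Int) c [c, a] hsl' hni, hih]
      simp [pvUnescapeGo]
    · -- at least three chars left: case on whether the window is an escape sequence
      have hsl' : PySem.List.slice cs (some (pre.length : Int)) (some ((pre.length : Int) + 3))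
          = [c, a, b] := by rw [hsl]; simp
      cases hkey : pvJidUnescapeB.get? [c, a, b] with
      | none =>
        have hnk := (PySem.Dict.get?_eq_none_iff_not_mem_keys _ _).mp hkey
        have hni : [c, a, b] ∉ pvJidEscapeSequences := by
          rw [pvDictB_eq] at hnk
          simp only [PySem.Dict.keys_mk] at hnk
          rw [pvSeqs_eq]
          simpa using hnk
        have hih := ih (a :: b :: rest) (pre ++ [c]) (acc ++ [[c]])
          (by simp at hlen ⊢; omega) (by rw [hcs]; simp)
        have e : (((pre ++ [c]).length : Nat) : Int) = (pre.length : Int) + 1 := by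
          push_cast [List.length_append, List.length_cons, List.length_nil]; ring
        rw [e] at hih
        simp only [PySem.List.enumerate_cons, List.foldl_cons] at hih ⊢
        rw [pvMiss cs acc (pre.length : Int) c [c, a, b] hsl' hni, hih]
        simp [pvUnescapeGo, hkey]
      | some v =>
        have hm := PySem.Dict.mem_items_of_get?_eq_some _ hkey
        rw [pvDictB_eq] at hm
        have hih := ih rest (pre ++ [c, a, b]) (acc ++ [v])
          (by simp at hlen ⊢; omega) (by rw [hcs]; simp)
        have e : (((pre ++ [c, a, b]).length : Nat) : Int) = (pre.length : Int) + 1 + 1 + 1 := by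
          push_cast [List.length_append, List.length_cons, List.length_nil]; ring
        rw [e] at hih
        simp at hm
        rcases hm with ⟨⟨rfl, rfl, rfl⟩, rfl⟩ | ⟨⟨rfl, rfl, rfl⟩, rfl⟩ | ⟨⟨rfl, rfl, rfl⟩, rfl⟩ |
          ⟨⟨rfl, rfl, rfl⟩, rfl⟩ | ⟨⟨rfl, rfl, rfl⟩, rfl⟩ | ⟨⟨rfl, rfl, rfl⟩, rfl⟩ |
          ⟨⟨rfl, rfl, rfl⟩, rfl⟩ | ⟨⟨rfl, rfl, rfl⟩, rfl⟩ | ⟨⟨rfl, rfl, rfl⟩, rfl⟩ |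
          ⟨⟨rfl, rfl, rfl⟩, rfl⟩ <;>
          simp only [PySem.List.enumerate_cons, List.foldl_cons]
        · rw [pvHit cs acc (pre.length : Int) '2' '0' [' ']
            (by decide) (by decide) (by decide) hsl' (by decide), hih]
          simp [pvUnescapeGo, hkey]
        · rw [pvHit cs acc (pre.length : Int) '2' '2' ['"']
            (by decide) (by decide) (by decide) hsl' (by decide), hih]
          simp [pvUnescapeGo, hkey]
        · rw [pvHit cs acc (pre.length : Int) '2' '6' ['&']
            (by decide) (by decide) (by decide) hsl' (by decide), hih]
          simp [pvUnescapeGo, hkey]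
        · rw [pvHit cs acc (pre.length : Int) '2' '7' ['\'']
            (by decide) (by decide) (by decide) hsl' (by decide), hih]
          simp [pvUnescapeGo, hkey]
        · rw [pvHit cs acc (pre.length : Int) '2' 'f' ['/']
            (by decide) (by decide) (by decide) hsl' (by decide), hih]
          simp [pvUnescapeGo, hkey]
        · rw [pvHit cs acc (pre.length : Int) '3' 'a' [':']
            (by decide) (by decide) (by decide) hsl' (by decide), hih]
          simp [pvUnescapeGo, hkey]
        · rw [pvHit cs acc (pre.length : Int) '3' 'c' ['<']
            (by decide) (by decide) (by decide) hsl' (by decide), hih]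
          simp [pvUnescapeGo, hkey]
        · rw [pvHit cs acc (pre.length : Int) '3' 'e' ['>']
            (by decide) (by decide) (by decide) hsl' (by decide), hih]
          simp [pvUnescapeGo, hkey]
        · rw [pvHit cs acc (pre.length : Int) '4' '0' ['@']
            (by decide) (by decide) (by decide) hsl' (by decide), hih]
          simp [pvUnescapeGo, hkey]
        · rw [pvHit cs acc (pre.length : Int) '5' 'c' ['\\']
            (by decide) (by decide) (by decide) hsl' (by decide), hih]
          simp [pvUnescapeGo, hkey]

-- ===== VERDICT (by name: the statement is the Claim_ definition above) =====
theorem unescape_node_py_spec : Claim_equal_unescape_node_py := by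
  intro node _
  unfold Spec_unescape_node_py unescape_node_py unescape_node_py_alt
  have h := pvMain node.toList node.toList.length node.toList [] [] le_rfl (by simp)
  simp only [List.length_nil, Nat.cast_zero, List.nil_append] at h
  show String.ofList (PySem.Chars.join []
      ((PySem.List.enumerate node.toList 0).foldl (pvStepA node.toList) ([], [])).1)
    = String.ofList (pvUnescapeGo node.toList)
  rw [h, PySem.Chars.join_nil_singletons]
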